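-- pv_equiv track=rewrite | github.com/DariusPi/422_Project | main.py | worsenetwork
-- ===== SOURCE A (Python) =====
-- def worsenetwork(current, goods):
--     for elem in goods:
--         match = True
--         for bit in range(0, len(current)):
--             if current[bit] == 1 and elem[bit] == 0:
--                 match = False
--                 break
--         if match:
--             return True
--     return False
-- ===== SOURCE B (Python) =====
-- def worsenetwork(current, goods):
--     # bit-major: keep the rows still viable, filter them at each required bit
--     cands = goods
--     for bit in range(len(current)):
--         if current[bit] == 1:
--             cands = [e for e in cands if bit < len(e) and e[bit] != 0]
--     return len(cands) > 0
-- ===== Notes on version B (the rewrite author's own statement) =====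
-- stated objective: alternative
-- what changed: B inverts the loop nesting: instead of A's row-major scan (for each candidate row, rescan current with a flag-and-break), B iterates over the bits of current once and at each required bit filters the surviving candidate set, returning whether any candidate survives all filters.
import Mathlib
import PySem

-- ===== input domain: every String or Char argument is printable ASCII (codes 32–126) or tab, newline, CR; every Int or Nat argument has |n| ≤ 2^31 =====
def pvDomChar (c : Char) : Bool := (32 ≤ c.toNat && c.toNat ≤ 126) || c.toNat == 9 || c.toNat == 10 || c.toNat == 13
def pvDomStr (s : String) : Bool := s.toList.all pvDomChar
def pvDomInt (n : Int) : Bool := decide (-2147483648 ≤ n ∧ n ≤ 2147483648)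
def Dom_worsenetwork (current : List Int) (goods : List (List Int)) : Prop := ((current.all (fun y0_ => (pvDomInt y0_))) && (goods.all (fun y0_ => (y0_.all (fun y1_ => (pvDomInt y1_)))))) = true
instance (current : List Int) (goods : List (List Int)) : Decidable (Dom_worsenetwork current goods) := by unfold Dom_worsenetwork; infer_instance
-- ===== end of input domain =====

-- B inverts the loop nesting: bits of current outer, filtering the surviving candidate
-- rows at each required bit, instead of A's per-row rescan of current (alternative, same cost).

-- ===== PORT A =====
-- inner loop: for bit in range(0, len(current)): if current[bit] == 1 and elem[bit] == 0: break
-- (elem[bit] ported as pyGetD with default 0: under Pre_ the index is always in range where accessed)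
def wnCheck (current elem : List Int) : List Int → Bool
  | [] => true
  | bit :: rest =>
    if PySem.List.pyGetD current bit 0 == 1 && PySem.List.pyGetD elem bit 0 == 0 then false
    else wnCheck current elem rest

def worsenetwork (current : List Int) (goods : List (List Int)) : Bool :=
  match goods with
  | [] => false
  | elem :: rest =>
    if wnCheck current elem (PySem.List.pyRange 0 current.length 1) then true
    else worsenetwork current rest

-- ===== PORT B =====
-- loop body: if current[bit] == 1: cands = [e for e in cands if bit < len(e) and e[bit] != 0]
def wnStep (current : List Int) (cands : List (List Int)) (bit : Int) : List (List Int) :=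
  if PySem.List.pyGetD current bit 0 == 1 then
    cands.filter (fun e => decide (bit < (e.length : Int)) && (PySem.List.pyGetD e bit 0 != 0))
  else cands

def worsenetwork_alt (current : List Int) (goods : List (List Int)) : Bool :=
  decide (0 < ((PySem.List.pyRange 0 current.length 1).foldl (wnStep current) goods).length)

-- ===== PRECONDITION & SPEC =====
-- A's inner check of candidate `elem` breaks cleanly at index i (first needed index where elem is 0, in range)
def wnElemFails (current elem : List Int) : Prop :=
  ∃ i < current.length, i < elem.length ∧ current.getD i 0 = 1 ∧ elem.getD i 0 = 0 ∧
    ∀ j < i, current.getD j 0 = 1 → (j < elem.length ∧ elem.getD j 0 ≠ 0)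

-- A's inner check of candidate `elem` hits IndexError at index i (first needed index, out of elem's range)
def wnElemErrs (current elem : List Int) : Prop :=
  ∃ i < current.length, elem.length ≤ i ∧ current.getD i 0 = 1 ∧
    ∀ j < i, current.getD j 0 = 1 → (j < elem.length ∧ elem.getD j 0 ≠ 0)

-- Pre_ excludes exactly the inputs where the Python A raises IndexError (some candidate reached
-- before any match is too short at a needed bit); B returns a value (the short row is filtered out) there.
def Pre_worsenetwork (current : List Int) (goods : List (List Int)) : Prop :=
  ¬ ∃ k < goods.length, wnElemErrs current (goods.getD k []) ∧
      ∀ m < k, wnElemFails current (goods.getD m [])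

instance (current : List Int) (goods : List (List Int)) : Decidable (Pre_worsenetwork current goods) := by
  unfold Pre_worsenetwork wnElemErrs wnElemFails; infer_instance

def pvWitness_worsenetwork : List Int × List (List Int) := ([1, 0, 1], [[0, 0, 0], [1, 1, 1]])

def Spec_worsenetwork (current : List Int) (goods : List (List Int)) (out : Bool) : Prop := out = worsenetwork_alt current goods
instance (current : List Int) (goods : List (List Int)) (out : Bool) : Decidable (Spec_worsenetwork current goods out) := by unfold Spec_worsenetwork; infer_instance

-- ===== CLAIM (what is proved, stated in full; the proofs are below) =====
def Claim_equal_worsenetwork : Prop := ∀ (current : List Int) (goods : List (List Int)), Dom_worsenetwork current goods → Pre_worsenetwork current goods → Spec_worsenetwork current goods (worsenetwork current goods)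

-- ===== LEMMAS AND PROOFS =====
-- the per-bit survival predicate both sides reduce to
def wnQ (current : List Int) (bit : Int) (e : List Int) : Bool :=
  !(PySem.List.pyGetD current bit 0 == 1) || (decide (bit < (e.length : Int)) && (PySem.List.pyGetD e bit 0 != 0))

theorem wnStep_eq_filter (current : List Int) (cands : List (List Int)) (bit : Int) :
    wnStep current cands bit = cands.filter (wnQ current bit) := by
  unfold wnStep wnQ
  by_cases h : PySem.List.pyGetD current bit 0 == 1
  · simp [h]
  · simp [h]

theorem foldl_wnStep_eq_filter (current : List Int) (bits : List Int) (cands : List (List Int)) :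
    bits.foldl (wnStep current) cands = cands.filter (fun e => bits.all (fun b => wnQ current b e)) := by
  induction bits generalizing cands with
  | nil => simp
  | cons b rest ih =>
    simp only [List.foldl_cons, ih, wnStep_eq_filter, List.filter_filter, List.all_cons]
    simp [Bool.and_comm]

-- for a nonnegative index, pyGetD's default-0 nonzero test coincides with B's range-and-nonzero test
theorem wnGetD_nonneg (e : List Int) (b : Int) (hb : 0 ≤ b) :
    (PySem.List.pyGetD e b 0 != 0) = (decide (b < (e.length : Int)) && (PySem.List.pyGetD e b 0 != 0)) := by
  by_cases h : b < (e.length : Int)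
  · simp [h]
  · have hcast : b = ((b.toNat : Nat) : Int) := by omega
    rw [hcast, PySem.List.pyGetD_natCast]
    have hlen : e.length ≤ b.toNat := by omega
    simp [List.getD_eq_getElem?_getD, List.getElem?_eq_none hlen, h]

theorem wnCheck_eq_all (current elem : List Int) (bits : List Int) (hb : ∀ b ∈ bits, 0 ≤ b) :
    wnCheck current elem bits = bits.all (fun b => wnQ current b elem) := by
  induction bits with
  | nil => rfl
  | cons b rest ih =>
    have hb0 : 0 ≤ b := hb b (by simp)
    have ih' := ih (fun x hx => hb x (by simp [hx]))
    unfold wnCheck wnQ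
    by_cases h1 : PySem.List.pyGetD current b 0 == 1
    · by_cases h2 : PySem.List.pyGetD elem b 0 == 0
      · have : (PySem.List.pyGetD elem b 0 != 0) = false := by
          simpa using h2
        simp [h1, h2, this]
      · have hnz : (PySem.List.pyGetD elem b 0 != 0) = true := by
          simpa using h2
        have hlt : decide (b < ((elem.length : Nat) : Int)) = true := by
          have h3 := wnGetD_nonneg elem b hb0
          rw [hnz] at h3
          simpa using h3.symm
        simp [h1, h2, ih', wnQ, hlt, hnz]
    · simp [h1, ih', wnQ]

theorem worsenetwork_eq_any (current : List Int) (goods : List (List Int)) :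
    worsenetwork current goods
      = goods.any (fun e => (PySem.List.pyRange 0 current.length 1).all (fun b => wnQ current b e)) := by
  induction goods with
  | nil => rfl
  | cons elem rest ih =>
    have hmem : ∀ b ∈ PySem.List.pyRange 0 (current.length : Int) 1, (0:Int) ≤ b := by
      intro b hbm
      exact (PySem.List.mem_pyRange_one.mp hbm).1
    simp only [worsenetwork, List.any_cons, ih, wnCheck_eq_all current elem _ hmem]
    by_cases h : (PySem.List.pyRange 0 (current.length : Int) 1).all (fun b => wnQ current b elem)
    · simp [h]
    · simp [h]

theorem worsenetwork_alt_eq_any (current : List Int) (goods : List (List Int)) :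
    worsenetwork_alt current goods
      = goods.any (fun e => (PySem.List.pyRange 0 current.length 1).all (fun b => wnQ current b e)) := by
  unfold worsenetwork_alt
  rw [foldl_wnStep_eq_filter]
  by_cases h : goods.any (fun e => (PySem.List.pyRange 0 current.length 1).all (fun b => wnQ current b e)) = true
  · rw [h]
    obtain ⟨e, he, hp⟩ := List.any_eq_true.mp h
    simp only [decide_eq_true_eq, List.length_pos_iff, ne_eq, List.filter_eq_nil_iff, not_forall]
    exact ⟨e, he, by simpa using hp⟩
  · rw [Bool.not_eq_true] at h
    have h' := List.any_eq_false.mp h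
    rw [h]
    simp only [decide_eq_false_iff_not, not_lt, Nat.le_zero, List.length_eq_zero_iff, List.filter_eq_nil_iff]
    exact fun a ha => by simpa using h' a ha

-- ===== VERDICT (by name: the statement is the Claim_ definition above) =====
theorem worsenetwork_spec : Claim_equal_worsenetwork := by
  intro current goods _ _
  unfold Spec_worsenetwork
  rw [worsenetwork_eq_any, worsenetwork_alt_eq_any]
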